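-- pv_equiv track=rewrite | github.com/gavinmdouglas/pangenome_working | functions/pop_gen.py | num_pairwise_diff_bases
-- ===== SOURCE A (Python) =====
-- def num_pairwise_diff_bases(bases):
--     '''Will return the number of differences for a set of bases. Note: this
--     function assumes that all bases are all one of A, C, T, G.'''
--
--     num_diff = 0
--
--     for possible_base in ['A', 'C', 'T', 'G']:
--
--         num_specific_base = sum(x == possible_base for x in bases)
--         num_other_base = len(bases) - num_specific_base
--
--         if num_specific_base == 0 or num_other_base == 0:
--             continue
--
--         num_diff += num_specific_base * num_other_base
--         bases = [b for b in bases if b != possible_base]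
--
--     return(num_diff)
-- ===== SOURCE B (Python) =====
-- def num_pairwise_diff_bases(bases):
--     n = len(bases)
--     a = bases.count('A')
--     c = bases.count('C')
--     t = bases.count('T')
--     g = bases.count('G')
--     o = n - a - c - t - g
--     return (n * n - a * a - c * c - t * t - g * g - o * o) // 2
-- ===== Notes on version B (the rewrite author's own statement) =====
-- stated objective: simpler
-- what changed: Replaces the four scan-and-rebuild list passes with four count() calls and a closed-form pair-counting formula (all non-ACTG symbols form one residual group, matching A which never separates them).
import Mathlib
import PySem

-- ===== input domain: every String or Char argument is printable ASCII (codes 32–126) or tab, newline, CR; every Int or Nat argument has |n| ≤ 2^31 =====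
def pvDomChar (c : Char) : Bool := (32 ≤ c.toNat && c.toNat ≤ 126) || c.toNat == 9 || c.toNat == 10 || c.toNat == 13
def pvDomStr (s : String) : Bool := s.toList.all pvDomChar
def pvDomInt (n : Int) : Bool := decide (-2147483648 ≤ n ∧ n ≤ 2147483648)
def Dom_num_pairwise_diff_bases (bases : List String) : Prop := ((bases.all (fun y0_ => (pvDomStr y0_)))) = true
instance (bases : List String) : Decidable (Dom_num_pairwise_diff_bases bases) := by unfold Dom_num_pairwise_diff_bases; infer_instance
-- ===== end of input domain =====

-- B replaces A's four scan-and-rebuild passes over the list by four count() calls and a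
-- closed-form pair-count formula (objective: simpler).

-- ===== PORT A =====
-- one iteration of A's 'for possible_base in [...]' loop body, state = (bases, num_diff)
def pvStepA (st : List String × Int) (pb : String) : List String × Int :=
  let num_specific_base : Int := (st.1.map (fun x => if x = pb then (1 : Int) else 0)).sum
  let num_other_base : Int := (st.1.length : Int) - num_specific_base
  if num_specific_base = 0 ∨ num_other_base = 0 then st
  else (st.1.filter (fun b => b ≠ pb), st.2 + num_specific_base * num_other_base)

def num_pairwise_diff_bases (bases : List String) : Int :=
  (["A", "C", "T", "G"].foldl pvStepA (bases, 0)).2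

-- ===== PORT B =====
def num_pairwise_diff_bases_alt (bases : List String) : Int :=
  let n : Int := bases.length
  let a : Int := PySem.List.count bases "A"
  let c : Int := PySem.List.count bases "C"
  let t : Int := PySem.List.count bases "T"
  let g : Int := PySem.List.count bases "G"
  let o : Int := n - a - c - t - g
  PySem.Int.floordiv (n * n - a * a - c * c - t * t - g * g - o * o) 2

-- ===== PRECONDITION & SPEC =====
def Spec_num_pairwise_diff_bases (bases : List String) (out : Int) : Prop := out = num_pairwise_diff_bases_alt bases
instance (bases : List String) (out : Int) : Decidable (Spec_num_pairwise_diff_bases bases out) := by unfold Spec_num_pairwise_diff_bases; infer_instance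

-- ===== CLAIM (what is proved, stated in full; the proofs are below) =====
def Claim_equal_num_pairwise_diff_bases : Prop := ∀ (bases : List String), Dom_num_pairwise_diff_bases bases → Spec_num_pairwise_diff_bases bases (num_pairwise_diff_bases bases)

-- ===== LEMMAS AND PROOFS =====

-- closed characterisation of A's fold: term + recurse on the filtered list
def pvG : List String → List String → Int
  | [], _ => 0
  | s :: ss, l =>
      (l.count s : Int) * ((l.length : Int) - (l.count s : Int)) +
        pvG ss (l.filter (fun b => !decide (b = s)))

lemma pvSum_eq_count (l : List String) (s : String) :
    (l.map (fun x => if x = s then (1 : Int) else 0)).sum = (l.count s : Int) := by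
  induction l with
  | nil => simp
  | cons x xs ih =>
    simp only [List.map_cons, List.sum_cons, ih, List.count_cons]
    by_cases h : x = s
    · simp [h]
      ring
    · simp [h, beq_iff_eq]

lemma pvFilter_id (l : List String) (s : String) (hc : l.count s = 0) :
    l.filter (fun b => !decide (b = s)) = l := by
  apply List.filter_eq_self.mpr
  intro x hx
  have : x ≠ s := by
    intro he; rw [List.count_eq_zero] at hc; exact hc (he ▸ hx)
  simp [this]

lemma pvG_all_eq (ss : List String) (l : List String) (s : String)
    (hall : ∀ x ∈ l, x = s) (hnot : s ∉ ss) : pvG ss l = 0 := by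
  induction ss generalizing l with
  | nil => rfl
  | cons s' ss ih =>
    have hs' : s' ≠ s := by intro h; exact hnot (h ▸ List.mem_cons_self ..)
    have hcnt : l.count s' = 0 := by
      rw [List.count_eq_zero]
      intro hmem; exact hs' (hall _ hmem)
    have hfil : l.filter (fun b => !decide (b = s')) = l := pvFilter_id l s' hcnt
    simp only [pvG, hcnt, hfil]
    rw [ih l hall (fun h => hnot (List.mem_cons_of_mem _ h))]
    push_cast; ring

lemma pvFoldA (ss : List String) (hnd : ss.Nodup) :
    ∀ l d, (ss.foldl pvStepA (l, d)).2 = d + pvG ss l := by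
  induction ss with
  | nil => intro l d; simp [pvG]
  | cons s ss ih =>
    intro l d
    have hnd' : ss.Nodup := hnd.of_cons
    have hs : s ∉ ss := (List.nodup_cons.mp hnd).1
    simp only [List.foldl_cons, pvStepA, pvSum_eq_count]
    by_cases h0 : (l.count s : Int) = 0
    · -- count is zero: skip branch, filter is identity, term is 0
      have hc : l.count s = 0 := by exact_mod_cast h0
      rw [if_pos (Or.inl h0), ih hnd' l d]
      simp [pvG, hc, pvFilter_id l s hc]
    · by_cases h1 : (l.length : Int) - (l.count s : Int) = 0
      · -- everything equals s: skip branch, both remaining sums are 0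
        have hcl : l.count s = l.length := by omega
        have hall : ∀ x ∈ l, x = s := fun x hx => (List.count_eq_length.mp hcl x hx).symm
        rw [if_pos (Or.inr h1), ih hnd' l d]
        have h2 : pvG ss (l.filter (fun b => !decide (b = s))) = 0 :=
          pvG_all_eq ss _ s (fun x hx => hall x (List.mem_of_mem_filter hx)) hs
        simp only [pvG, pvG_all_eq ss l s hall hs, h2, h1]
        ring
      · rw [if_neg (not_or.mpr ⟨h0, h1⟩), ih hnd']
        simp only [pvG, ne_eq, decide_not]
        ring

lemma pvCount_filter_ne (l : List String) (s v : String) (h : v ≠ s) :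
    (l.filter (fun b => !decide (b = s))).count v = l.count v := by
  rw [List.count_filter]
  simp [h]

lemma pvLength_filter_ne (l : List String) (s : String) :
    ((l.filter (fun b => !decide (b = s))).length : Int) = (l.length : Int) - (l.count s : Int) := by
  induction l with
  | nil => simp
  | cons x xs ih =>
    by_cases h : x = s
    · simp only [List.filter_cons, List.count_cons, h, decide_true, Bool.not_true,
        List.length_cons, beq_self_eq_true, if_true]
      push_cast
      omega
    · simp only [List.filter_cons, List.count_cons, h, decide_false, Bool.not_false,
        if_true, List.length_cons, beq_iff_eq]
      push_cast
      omega

theorem pvMain (bases : List String) :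
    num_pairwise_diff_bases bases = num_pairwise_diff_bases_alt bases := by
  have hA : num_pairwise_diff_bases bases = pvG ["A", "C", "T", "G"] bases := by
    unfold num_pairwise_diff_bases
    rw [pvFoldA _ (by decide) bases 0, zero_add]
  rw [hA]
  unfold num_pairwise_diff_bases_alt
  simp only [PySem.List.count_eq]
  set N : Int := (bases.length : Int) with hN
  set A : Int := (bases.count "A" : Int) with hAc
  set C : Int := (bases.count "C" : Int) with hCc
  set T : Int := (bases.count "T" : Int) with hTc
  set G : Int := (bases.count "G" : Int) with hGc
  -- unfold pvG on the literal symbol list, rewriting counts/lengths through the filters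
  have hG : pvG ["A", "C", "T", "G"] bases =
      A * (N - A) + C * (N - A - C) + T * (N - A - C - T) + G * (N - A - C - T - G) := by
    simp only [pvG,
      pvCount_filter_ne _ _ _ (by decide : ("C" : String) ≠ "A"),
      pvCount_filter_ne _ _ _ (by decide : ("T" : String) ≠ "A"),
      pvCount_filter_ne _ _ _ (by decide : ("T" : String) ≠ "C"),
      pvCount_filter_ne _ _ _ (by decide : ("G" : String) ≠ "A"),
      pvCount_filter_ne _ _ _ (by decide : ("G" : String) ≠ "C"),
      pvCount_filter_ne _ _ _ (by decide : ("G" : String) ≠ "T"),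
      pvLength_filter_ne]
    rw [← hN, ← hAc, ← hCc, ← hTc, ← hGc]
    ring
  rw [hG]
  have hnum : N * N - A * A - C * C - T * T - G * G -
      (N - A - C - T - G) * (N - A - C - T - G) =
      2 * (A * (N - A) + C * (N - A - C) + T * (N - A - C - T) + G * (N - A - C - T - G)) := by
    ring
  rw [hnum, PySem.Int.floordiv_eq_ediv_of_pos (by norm_num)]
  omega

-- ===== VERDICT (by name: the statement is the Claim_ definition above) =====
theorem num_pairwise_diff_bases_spec : Claim_equal_num_pairwise_diff_bases := by
  intro bases _
  exact pvMain bases
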